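-- pv_equiv track=rewrite | github.com/staircase-dev/staircase | tests/test_floats/test_floats_logical.py | _compare_iterables
-- ===== SOURCE A (Python) =====
-- def _compare_iterables(it1, it2):
--     it1 = [i for i in it1 if i is not None]
--     it2 = [i for i in it2 if i is not None]
--     if len(it2) != len(it1):
--         return False
--     for e1, e2 in zip(it1, it2):
--         if e1 != e2:
--             return False
--     return True
-- ===== SOURCE B (Python) =====
-- def _compare_iterables(it1, it2):
--     xs, ys = list(it1), list(it2)
--     i = j = 0
--     while True:
--         while i < len(xs) and xs[i] is None:
--             i += 1
--         while j < len(ys) and ys[j] is None: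
--             j += 1
--         if i == len(xs) or j == len(ys):
--             return i == len(xs) and j == len(ys)
--         if xs[i] != ys[j]:
--             return False
--         i += 1
--         j += 1
-- ===== Notes on version B (the rewrite author's own statement) =====
-- stated objective: alternative
-- what changed: Replaces A's staged pipeline (build two None-stripped lists, compare lengths, then zip-loop) with a single two-pointer walk over the raw inputs that skips None entries in place and compares on the fly, detecting a length mismatch when one pointer exhausts before the other; no intermediate lists, no length precheck, no zip.
import Mathlib
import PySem

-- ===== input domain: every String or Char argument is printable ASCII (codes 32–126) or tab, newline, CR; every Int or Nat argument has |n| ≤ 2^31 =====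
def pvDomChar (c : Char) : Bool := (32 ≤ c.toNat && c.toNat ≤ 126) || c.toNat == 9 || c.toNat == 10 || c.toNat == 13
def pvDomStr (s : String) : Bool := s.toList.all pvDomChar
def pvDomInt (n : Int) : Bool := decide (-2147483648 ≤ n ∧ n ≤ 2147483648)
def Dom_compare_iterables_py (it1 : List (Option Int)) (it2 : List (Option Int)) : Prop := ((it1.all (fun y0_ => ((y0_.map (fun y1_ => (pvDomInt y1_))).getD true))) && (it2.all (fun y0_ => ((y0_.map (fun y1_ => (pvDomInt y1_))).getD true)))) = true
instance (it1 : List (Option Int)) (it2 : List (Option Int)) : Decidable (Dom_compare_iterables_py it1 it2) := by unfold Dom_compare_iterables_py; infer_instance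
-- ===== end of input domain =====

-- B replaces A's staged pipeline (strip Nones into two lists, length check, zip loop)
-- with a single two-pointer walk over the raw inputs that skips Nones in place
-- (objective: alternative, same asymptotic cost).


-- ===== PORT A =====
-- the for-loop over zip(it1, it2) with early return False
def compareLoopA : List (Int × Int) → Bool
  | [] => true
  | (e1, e2) :: rest => if e1 ≠ e2 then false else compareLoopA rest

def compare_iterables_py (it1 : List (Option Int)) (it2 : List (Option Int)) : Bool :=
  let l1 := it1.filterMap id    -- [i for i in it1 if i is not None]
  let l2 := it2.filterMap id
  if l2.length ≠ l1.length then false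
  else compareLoopA (l1.zip l2)

-- ===== PORT B =====
-- the two-pointer loop: the remaining suffixes of xs and ys play the role of the
-- index pointers i and j; skipping a None advances one pointer, a comparison both.
def twoPointer : List (Option Int) → List (Option Int) → Bool
  | none :: xs, ys => twoPointer xs ys                  -- skip None in xs (i += 1)
  | some x :: xs, none :: ys => twoPointer (some x :: xs) ys   -- skip None in ys (j += 1)
  | some x :: xs, some y :: ys =>                        -- both pointers at real elements
      if x ≠ y then false else twoPointer xs ys
  | some _ :: _, [] => false                             -- ys exhausted, xs not
  | [], ys => (ys.dropWhile Option.isNone).isEmpty       -- xs exhausted: ys must hold only Nones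

def compare_iterables_py_alt (it1 : List (Option Int)) (it2 : List (Option Int)) : Bool :=
  twoPointer it1 it2

-- ===== PRECONDITION & SPEC =====
def Spec_compare_iterables_py (it1 : List (Option Int)) (it2 : List (Option Int)) (out : Bool) : Prop := out = compare_iterables_py_alt it1 it2
instance (it1 : List (Option Int)) (it2 : List (Option Int)) (out : Bool) : Decidable (Spec_compare_iterables_py it1 it2 out) := by unfold Spec_compare_iterables_py; infer_instance

-- ===== CLAIM (what is proved, stated in full; the proofs are below) =====
def Claim_equal_compare_iterables_py : Prop := ∀ (it1 : List (Option Int)) (it2 : List (Option Int)), Dom_compare_iterables_py it1 it2 → Spec_compare_iterables_py it1 it2 (compare_iterables_py it1 it2)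

-- ===== LEMMAS AND PROOFS =====
-- A's length check plus zip loop is list equality of the two filtered lists.
theorem compareA_eq_beq (l1 l2 : List Int) :
    (if l2.length ≠ l1.length then false else compareLoopA (l1.zip l2)) = (l1 == l2) := by
  induction l1 generalizing l2 with
  | nil => cases l2 <;> simp [compareLoopA]
  | cons x xs ih =>
    cases l2 with
    | nil => simp
    | cons y ys =>
      simp only [List.zip_cons_cons, List.length_cons, compareLoopA, List.cons_beq_cons]
      by_cases h : x = y
      · rw [← ih ys]; simp [h]
      · simp [h]

-- the two-pointer walk decides equality of the None-stripped lists.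
theorem twoPointer_eq_beq (xs ys : List (Option Int)) :
    twoPointer xs ys = (xs.filterMap id == ys.filterMap id) := by
  induction xs, ys using twoPointer.induct with
  | case1 xs ys ih => simpa [twoPointer] using ih
  | case2 x xs ys ih => simpa [twoPointer] using ih
  | case3 x xs y ys h => simp [twoPointer, h]
  | case4 x xs y ys h ih =>
    have hxy : x = y := by omega
    simp [twoPointer, hxy, ih]
  | case5 x xs => simp [twoPointer]
  | case6 ys =>
    cases ys with
    | nil => simp [twoPointer]
    | cons z zs =>
      cases z with
      | none =>
        simp only [twoPointer, List.dropWhile, Option.isNone_none]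
        induction zs with
        | nil => simp
        | cons w ws ihw =>
          cases w <;> simp_all [List.dropWhile]
      | some v => simp [twoPointer, List.dropWhile]

-- ===== VERDICT (by name: the statement is the Claim_ definition above) =====
theorem compare_iterables_py_spec : Claim_equal_compare_iterables_py := by
  intro it1 it2 _
  unfold Spec_compare_iterables_py compare_iterables_py compare_iterables_py_alt
  rw [compareA_eq_beq, twoPointer_eq_beq]
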